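-- pv_equiv track=rewrite | github.com/CDMY0417/Tool_MATH | function_tools/function_total/mbxc8o.py | modular_repeat_cycle
-- ===== SOURCE A (Python) =====
-- def modular_repeat_cycle(base: int, modulus: int) -> int:
--     current = base
--     count = 1
--     seen_values = {current}
--     while True:
--         current = (current * base) % modulus
--         if current in seen_values:
--             break
--         seen_values.add(current)
--         count += 1
--     return count
-- ===== SOURCE B (Python) =====
-- def modular_repeat_cycle(base: int, modulus: int) -> int:
--     # Brent's cycle detection on f(x) = (x * base) % modulus, starting from x0 = base.
--     # Phase 1: find the cycle length lam with the power-of-two hare.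
--     power = 1
--     lam = 1
--     tortoise = base
--     hare = (base * base) % modulus
--     while tortoise != hare:
--         if power == lam:
--             tortoise = hare
--             power *= 2
--             lam = 0
--         hare = (hare * base) % modulus
--         lam += 1
--     # Phase 2: find the preperiod mu by walking two pointers lam apart.
--     hare = base
--     for _ in range(lam):
--         hare = (hare * base) % modulus
--     tortoise = base
--     mu = 0
--     while tortoise != hare:
--         tortoise = (tortoise * base) % modulus
--         hare = (hare * base) % modulus
--         mu += 1
--     return mu + lam
-- ===== Notes on version B (the rewrite author's own statement) =====
-- stated objective: alternative
-- what changed: Replaced the grow-a-hash-set scan with Brent's O(1)-memory cycle detection: find the cycle length lambda with the power-of-two hare, then the preperiod mu with two pointers lambda apart, and return mu+lambda.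
import Mathlib
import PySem

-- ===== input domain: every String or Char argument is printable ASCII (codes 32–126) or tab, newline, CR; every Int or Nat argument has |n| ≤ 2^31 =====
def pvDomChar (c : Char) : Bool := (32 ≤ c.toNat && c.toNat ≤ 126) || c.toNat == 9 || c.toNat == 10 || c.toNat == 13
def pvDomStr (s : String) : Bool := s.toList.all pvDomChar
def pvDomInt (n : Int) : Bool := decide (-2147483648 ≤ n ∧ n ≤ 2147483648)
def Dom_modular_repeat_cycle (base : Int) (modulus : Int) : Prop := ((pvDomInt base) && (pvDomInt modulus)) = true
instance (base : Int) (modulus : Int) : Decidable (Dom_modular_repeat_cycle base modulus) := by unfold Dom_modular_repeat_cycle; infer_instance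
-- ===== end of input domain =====

-- B replaces A's grow-a-set scan by Brent's O(1)-memory cycle detection (find lambda, then mu, return mu+lambda); equivalence proved for modulus ≠ 0 (A raises ZeroDivisionError at modulus = 0).


-- ===== PORT A =====
-- the while-loop of A; fuel only makes the recursion total (|modulus|+2 bounds the number of
-- distinct values, hence of iterations, whenever modulus ≠ 0)
def pvALoop (base modulus : Int) : Nat → Int → Int → PySem.Set Int → Int
  | 0, _, count, _ => count
  | fuel+1, current, count, seen =>
    let c := PySem.Int.mod (current * base) modulus
    if PySem.Set.contains seen c then count
    else pvALoop base modulus fuel c (count + 1) (PySem.Set.add seen c)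

def modular_repeat_cycle (base : Int) (modulus : Int) : Int :=
  pvALoop base modulus (modulus.natAbs + 2) base 1 (PySem.Set.ofList [base])

-- ===== PORT B =====
-- Brent phase 1 (fuel only makes the while-loop total; 4*(|modulus|+2) bounds its iterations)
def pvBrentLoop1 (base modulus : Int) : Nat → Int → Int → Nat → Nat → Nat
  | 0, _, _, _, lam => lam
  | fuel+1, tortoise, hare, power, lam =>
    if tortoise = hare then lam
    else if power = lam then
      pvBrentLoop1 base modulus fuel hare (PySem.Int.mod (hare * base) modulus) (power * 2) 1
    else
      pvBrentLoop1 base modulus fuel tortoise (PySem.Int.mod (hare * base) modulus) power (lam + 1)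

-- the 'for _ in range(n): hare = (hare*base) % modulus' loop
def pvAdvance (base modulus : Int) : Nat → Int → Int
  | 0, x => x
  | n+1, x => pvAdvance base modulus n (PySem.Int.mod (x * base) modulus)

-- Brent phase 2 (fuel only makes the while-loop total; |modulus|+2 bounds mu)
def pvBrentLoop2 (base modulus : Int) : Nat → Int → Int → Nat → Nat
  | 0, _, _, mu => mu
  | fuel+1, tortoise, hare, mu =>
    if tortoise = hare then mu
    else pvBrentLoop2 base modulus fuel (PySem.Int.mod (tortoise * base) modulus)
      (PySem.Int.mod (hare * base) modulus) (mu + 1)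

def modular_repeat_cycle_alt (base : Int) (modulus : Int) : Int :=
  let lam := pvBrentLoop1 base modulus (4 * (modulus.natAbs + 2)) base
    (PySem.Int.mod (base * base) modulus) 1 1
  let hare := pvAdvance base modulus lam base
  let mu := pvBrentLoop2 base modulus (modulus.natAbs + 2) base hare 0
  ((mu + lam : Nat) : Int)

-- ===== PRECONDITION & SPEC =====
-- Pre_ excludes exactly modulus = 0, where A raises ZeroDivisionError on the first '%'.
def Pre_modular_repeat_cycle (base : Int) (modulus : Int) : Prop := modulus ≠ 0
instance (base : Int) (modulus : Int) : Decidable (Pre_modular_repeat_cycle base modulus) := by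
  unfold Pre_modular_repeat_cycle; infer_instance
def pvWitness_modular_repeat_cycle : Int × Int := (2, 10)

def Spec_modular_repeat_cycle (base : Int) (modulus : Int) (out : Int) : Prop := out = modular_repeat_cycle_alt base modulus
instance (base : Int) (modulus : Int) (out : Int) : Decidable (Spec_modular_repeat_cycle base modulus out) := by unfold Spec_modular_repeat_cycle; infer_instance

-- ===== CLAIM (what is proved, stated in full; the proofs are below) =====
def Claim_equal_modular_repeat_cycle : Prop := ∀ (base : Int) (modulus : Int), Dom_modular_repeat_cycle base modulus → Pre_modular_repeat_cycle base modulus → Spec_modular_repeat_cycle base modulus (modular_repeat_cycle base modulus)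

-- ===== LEMMAS AND PROOFS =====

-- the iterated map x ↦ (x*base) % modulus and its orbit starting at the unreduced base
def pvStep (b m x : Int) : Int := PySem.Int.mod (x * b) m
def pvOrbit (b m : Int) (k : Nat) : Int := (pvStep b m)^[k] b

theorem pvOrbit_zero (b m : Int) : pvOrbit b m 0 = b := rfl

theorem pvOrbit_succ (b m : Int) (k : Nat) :
    pvOrbit b m (k + 1) = pvStep b m (pvOrbit b m k) := by
  simp [pvOrbit, Function.iterate_succ_apply']

theorem pvOrbit_shift {b m : Int} {i j : Nat} (h : pvOrbit b m i = pvOrbit b m j) (k : Nat) :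
    pvOrbit b m (i + k) = pvOrbit b m (j + k) := by
  simp only [pvOrbit, Nat.add_comm _ k, Function.iterate_add_apply]
  exact congrArg _ h

theorem pvOrbit_rep_mul {b m : Int} {i p : Nat}
    (h : pvOrbit b m (i + p) = pvOrbit b m i) (t : Nat) :
    pvOrbit b m (i + t * p) = pvOrbit b m i := by
  induction t with
  | zero => simp
  | succ t ih =>
    have := pvOrbit_shift h (t * p)
    have e : i + p + t * p = i + (t + 1) * p := by ring
    rw [e] at this
    exact this.trans ih

theorem pvPeriod_all {b m : Int} {mu lam : Nat}
    (hper : pvOrbit b m (mu + lam) = pvOrbit b m mu) :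
    ∀ i, mu ≤ i → pvOrbit b m (i + lam) = pvOrbit b m i := by
  intro i hi
  have h1 := pvOrbit_shift hper (i - mu)
  have e1 : mu + lam + (i - mu) = i + lam := by omega
  have e2 : mu + (i - mu) = i := by omega
  rw [e1, e2] at h1; exact h1

theorem pvTransfer {b m : Int} {mu lam : Nat}
    (hlam : 0 < lam)
    (hper : ∀ i, mu ≤ i → pvOrbit b m (i + lam) = pvOrbit b m i)
    {i p : Nat} (hp : 0 < p) (hrep : pvOrbit b m (i + p) = pvOrbit b m i) :
    pvOrbit b m (i + lam) = pvOrbit b m i := by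
  have hmul := pvOrbit_rep_mul hrep mu
  have h1 : pvOrbit b m (i + mu * p + lam) = pvOrbit b m (i + lam) := by
    have := pvOrbit_shift hmul lam
    simpa using this
  have h2 : pvOrbit b m (i + mu * p + lam) = pvOrbit b m (i + mu * p) :=
    hper _ (by nlinarith)
  rw [← h1, h2, hmul]

-- residues of '% m': the finite set every orbit value after the start lies in
noncomputable def pvRes (m : Int) : Finset Int := if 0 < m then Finset.Ico 0 m else Finset.Ioc m 0

theorem pvRes_card {m : Int} (hm : m ≠ 0) : (pvRes m).card = m.natAbs := by
  unfold pvRes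
  split_ifs with h
  · rw [Int.card_Ico]; omega
  · rw [Int.card_Ioc]; omega

theorem pvStep_mem_res {m : Int} (hm : m ≠ 0) (b x : Int) : pvStep b m x ∈ pvRes m := by
  unfold pvRes pvStep
  split_ifs with h
  · rw [Finset.mem_Ico]
    exact ⟨PySem.Int.mod_nonneg _ h, PySem.Int.mod_lt _ h⟩
  · rw [Finset.mem_Ioc]
    exact PySem.Int.mod_neg_bounds _ (by omega)

theorem pvOrbit_succ_mem_res {m : Int} (hm : m ≠ 0) (b : Int) (k : Nat) :
    pvOrbit b m (k + 1) ∈ pvRes m := by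
  rw [pvOrbit_succ]; exact pvStep_mem_res hm b _

theorem pvExists_rep {b m : Int} (hm : m ≠ 0) :
    ∃ i p, 0 < p ∧ pvOrbit b m (i + p) = pvOrbit b m i := by
  have hmap : ∀ j ∈ Finset.Icc 1 (m.natAbs + 1), pvOrbit b m j ∈ pvRes m := by
    intro j hj
    rw [Finset.mem_Icc] at hj
    obtain ⟨k, rfl⟩ : ∃ k, j = k + 1 := ⟨j - 1, by omega⟩
    exact pvOrbit_succ_mem_res hm b k
  have hcard : (pvRes m).card < (Finset.Icc 1 (m.natAbs + 1)).card := by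
    rw [pvRes_card hm, Nat.card_Icc]; omega
  obtain ⟨x, hx, y, hy, hne, hxy⟩ :=
    Finset.exists_ne_map_eq_of_card_lt_of_maps_to hcard hmap
  rcases Nat.lt_or_ge x y with h | h
  · exact ⟨x, y - x, by omega, by rw [show x + (y - x) = y by omega]; exact hxy.symm⟩
  · exact ⟨y, x - y, by omega, by rw [show y + (x - y) = x by omega]; exact hxy⟩

theorem pvBound {b m : Int} {mu lam : Nat} (hm : m ≠ 0) (hlam : 0 < lam)
    (hdist : ∀ i j, i < j → j < mu + lam → pvOrbit b m i ≠ pvOrbit b m j) :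
    mu + lam ≤ m.natAbs + 1 := by
  have hinj : Set.InjOn (fun k => pvOrbit b m (k + 1)) ↑(Finset.range (mu + lam - 1)) := by
    intro x hx y hy hxy
    simp only [Finset.coe_range, Set.mem_Iio] at hx hy
    by_contra hne
    rcases Nat.lt_or_ge x y with h | h
    · exact hdist (x + 1) (y + 1) (by omega) (by omega) hxy
    · exact hdist (y + 1) (x + 1) (by omega) (by omega) hxy.symm
  have hmap : ∀ k ∈ Finset.range (mu + lam - 1), pvOrbit b m (k + 1) ∈ pvRes m := by
    intro k _; exact pvOrbit_succ_mem_res hm b k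
  have := Finset.card_le_card_of_injOn _ hmap hinj
  rw [Finset.card_range, pvRes_card hm] at this
  omega

-- A's loop: with current = orbit (c-1) and seen = the first c orbit values, it returns mu+lam
theorem pvALoop_eq {b m : Int} {mu lam : Nat} (hlam : 0 < lam)
    (hper : pvOrbit b m (mu + lam) = pvOrbit b m mu)
    (hdist : ∀ i j, i < j → j < mu + lam → pvOrbit b m i ≠ pvOrbit b m j) :
    ∀ fuel c, 1 ≤ c → c ≤ mu + lam → mu + lam + 1 ≤ c + fuel →
    pvALoop b m fuel (pvOrbit b m (c - 1)) (c : Int) ((List.range c).map (pvOrbit b m)) =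
      ((mu + lam : Nat) : Int) := by
  intro fuel
  induction fuel with
  | zero => intro c h1 h2 h3; omega
  | succ fuel ih =>
    intro c h1 h2 h3
    have hc' : PySem.Int.mod (pvOrbit b m (c - 1) * b) m = pvOrbit b m c := by
      rw [show c = (c - 1) + 1 by omega, pvOrbit_succ]; rfl
    simp only [pvALoop, hc']
    by_cases hin : pvOrbit b m c ∈ (List.range c).map (pvOrbit b m)
    · rw [if_pos ((PySem.Set.contains_iff _ _).mpr hin)]
      obtain ⟨i, hi, hoi⟩ := List.mem_map.mp hin
      rw [List.mem_range] at hi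
      have : c = mu + lam := by
        by_contra hne
        exact hdist i c hi (by omega) hoi
      rw [this]
    · rw [if_neg (by rw [PySem.Set.contains_iff]; exact hin)]
      have hc_lt : c < mu + lam := by
        rcases Nat.lt_or_ge c (mu + lam) with h | h
        · exact h
        · exfalso
          apply hin
          rw [List.mem_map]
          refine ⟨mu, ?_, ?_⟩
          · rw [List.mem_range]; omega
          · rw [show c = mu + lam by omega]; exact hper.symm
      have hadd : PySem.Set.add ((List.range c).map (pvOrbit b m)) (pvOrbit b m c)
          = (List.range (c + 1)).map (pvOrbit b m) := by
        rw [PySem.Set.add_of_not_mem hin, List.range_succ, List.map_append, List.map_cons,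
          List.map_nil]
      have := ih (c + 1) (by omega) (by omega) (by omega)
      rw [show (c + 1) - 1 = c by omega] at this
      rw [hadd]
      have hcast : (c : Int) + 1 = ((c + 1 : Nat) : Int) := by push_cast; ring
      rw [hcast]
      exact this

-- Brent phase 1: starting a stage at tortoise = orbit (2^k-1), it returns lam
theorem pvBrent1_eq {b m : Int} {mu lam K : Nat} (hlam : 0 < lam)
    (hper : ∀ i, mu ≤ i → pvOrbit b m (i + lam) = pvOrbit b m i)
    (hfactA : ∀ i p, 0 < p → pvOrbit b m (i + p) = pvOrbit b m i → mu ≤ i ∧ lam ≤ p)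
    (hK1 : mu ≤ 2 ^ K - 1) (hK2 : lam ≤ 2 ^ K) :
    ∀ fuel k l, 1 ≤ l → l ≤ 2 ^ k → k ≤ K → (k = K → l ≤ lam) →
      (∀ l', 1 ≤ l' → l' < l → pvOrbit b m (2 ^ k - 1 + l') ≠ pvOrbit b m (2 ^ k - 1)) →
      2 ^ K - 1 + lam + 1 ≤ (2 ^ k - 1 + l) + fuel →
      pvBrentLoop1 b m fuel (pvOrbit b m (2 ^ k - 1)) (pvOrbit b m (2 ^ k - 1 + l)) (2 ^ k) l
        = lam := by
  intro fuel
  induction fuel with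
  | zero =>
    intro k l hl1 hl2 hkK hatK _ hfuel
    exfalso
    have h1k : 1 ≤ 2 ^ k := Nat.one_le_two_pow
    have h1K : 1 ≤ 2 ^ K := Nat.one_le_two_pow
    by_cases hk : k = K
    · subst hk; have := hatK rfl; omega
    · have hkltK : k + 1 ≤ K := by omega
      have h2 : 2 ^ (k + 1) ≤ 2 ^ K := Nat.pow_le_pow_right (by omega) hkltK
      have h3 : 2 ^ (k + 1) = 2 * 2 ^ k := by rw [Nat.pow_succ]; ring
      omega
  | succ fuel ih =>
    intro k l hl1 hl2 hkK hatK hno hfuel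
    have h1k : 1 ≤ 2 ^ k := Nat.one_le_two_pow
    have h1K : 1 ≤ 2 ^ K := Nat.one_le_two_pow
    simp only [pvBrentLoop1]
    by_cases hmeet : pvOrbit b m (2 ^ k - 1) = pvOrbit b m (2 ^ k - 1 + l)
    · rw [if_pos hmeet]
      obtain ⟨hmu_le, hlam_le⟩ := hfactA (2 ^ k - 1) l (by omega) hmeet.symm
      by_contra hne
      have hlaml : lam < l := by omega
      exact hno lam (by omega) hlaml (hper (2 ^ k - 1) hmu_le)
    · rw [if_neg hmeet]
      have hstep : PySem.Int.mod (pvOrbit b m (2 ^ k - 1 + l) * b) m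
          = pvOrbit b m (2 ^ k - 1 + l + 1) := by rw [pvOrbit_succ]; rfl
      by_cases heq : 2 ^ k = l
      · rw [if_pos heq]
        -- a stage can only end strictly before K
        have hkne : k ≠ K := by
          intro hk
          have hle := hatK hk
          have h2K : 2 ^ K = l := by rw [← hk]; exact heq
          have hll : l = lam := by omega
          apply hmeet
          rw [hll]
          exact (hper (2 ^ k - 1) (by rw [hk]; exact hK1)).symm
        have hidx : 2 ^ k - 1 + l = 2 ^ (k + 1) - 1 := by
          have : 2 ^ (k + 1) = 2 * 2 ^ k := by rw [Nat.pow_succ]; ring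
          omega
        have hp : 2 ^ (k + 1) = 2 * 2 ^ k := by rw [Nat.pow_succ]; ring
        have h2 : 2 ^ (k + 1) ≤ 2 ^ K := Nat.pow_le_pow_right (by omega) (by omega)
        rw [hstep, hidx, show 2 ^ k * 2 = 2 ^ (k + 1) by rw [Nat.pow_succ]]
        exact ih (k + 1) 1 (le_refl 1) Nat.one_le_two_pow (by omega)
          (fun _ => hlam) (by intro l' h1' h2'; omega) (by omega)
      · rw [if_neg heq]
        have hnew_atK : k = K → l + 1 ≤ lam := by
          intro hk
          have hle := hatK hk
          have hne : l ≠ lam := by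
            intro h
            apply hmeet
            rw [h]
            exact (hper (2 ^ k - 1) (by rw [hk]; exact hK1)).symm
          omega
        have := ih k (l + 1) (by omega) (by omega) hkK hnew_atK
          (by
            intro l' h1' h2'
            rcases Nat.lt_or_ge l' l with h | h
            · exact hno l' h1' h
            · have : l' = l := by omega
              subst this
              exact fun hc => hmeet hc.symm)
          (by omega)
        rw [hstep, show 2 ^ k - 1 + l + 1 = 2 ^ k - 1 + (l + 1) by omega]
        exact this

-- the for-loop advancing the hare lam steps
theorem pvAdvance_orbit (b m : Int) : ∀ n k,
    pvAdvance b m n (pvOrbit b m k) = pvOrbit b m (k + n) := by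
  intro n
  induction n with
  | zero => intro k; rfl
  | succ n ih =>
    intro k
    have hstep : PySem.Int.mod (pvOrbit b m k * b) m = pvOrbit b m (k + 1) := by
      rw [pvOrbit_succ]; rfl
    simp only [pvAdvance, hstep, ih (k + 1)]
    congr 1
    omega

-- Brent phase 2: two pointers lam apart meet exactly at index mu
theorem pvBrent2_eq {b m : Int} {mu lam : Nat}
    (hper0 : pvOrbit b m (mu + lam) = pvOrbit b m mu)
    (hmu_min : ∀ i, pvOrbit b m (i + lam) = pvOrbit b m i → mu ≤ i) :
    ∀ fuel i, i ≤ mu → mu + 1 ≤ i + fuel →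
      pvBrentLoop2 b m fuel (pvOrbit b m i) (pvOrbit b m (i + lam)) i = mu := by
  intro fuel
  induction fuel with
  | zero => intro i h1 h2; omega
  | succ fuel ih =>
    intro i h1 h2
    simp only [pvBrentLoop2]
    by_cases h : pvOrbit b m i = pvOrbit b m (i + lam)
    · rw [if_pos h]
      have := hmu_min i h.symm
      omega
    · rw [if_neg h]
      have hi : i < mu := by
        rcases Nat.lt_or_ge i mu with hlt | hge
        · exact hlt
        · exfalso
          have : i = mu := by omega
          subst this
          exact h hper0.symm
      have hs1 : PySem.Int.mod (pvOrbit b m i * b) m = pvOrbit b m (i + 1) := by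
        rw [pvOrbit_succ]; rfl
      have hs2 : PySem.Int.mod (pvOrbit b m (i + lam) * b) m = pvOrbit b m (i + 1 + lam) := by
        rw [show i + 1 + lam = (i + lam) + 1 by omega, pvOrbit_succ]; rfl
      rw [hs1, hs2]
      exact ih (i + 1) (by omega) (by omega)

-- ===== VERDICT (by name: the statement is the Claim_ definition above) =====
theorem modular_repeat_cycle_spec : Claim_equal_modular_repeat_cycle := by
  intro b m _ hm
  unfold Spec_modular_repeat_cycle
  classical
  obtain ⟨i0, p0, hp0, hrep0⟩ := pvExists_rep (b := b) hm
  have hQP : ∃ p, 0 < p ∧ ∃ i, pvOrbit b m (i + p) = pvOrbit b m i := ⟨p0, hp0, i0, hrep0⟩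
  obtain ⟨hlam_pos, i1, hi1⟩ := Nat.find_spec hQP
  have hlam_min : ∀ p, 0 < p → (∃ i, pvOrbit b m (i + p) = pvOrbit b m i) →
      Nat.find hQP ≤ p := fun p hp hi => Nat.find_min' hQP ⟨hp, hi⟩
  set lam := Nat.find hQP with hlamdef
  have hMP : ∃ i, pvOrbit b m (i + lam) = pvOrbit b m i := ⟨i1, hi1⟩
  have hper0 : pvOrbit b m (Nat.find hMP + lam) = pvOrbit b m (Nat.find hMP) :=
    Nat.find_spec hMP
  have hmu_min : ∀ i, pvOrbit b m (i + lam) = pvOrbit b m i → Nat.find hMP ≤ i :=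
    fun i h => Nat.find_min' hMP h
  set mu := Nat.find hMP with hmudef
  have hper := pvPeriod_all hper0
  have hfactA : ∀ i p, 0 < p → pvOrbit b m (i + p) = pvOrbit b m i → mu ≤ i ∧ lam ≤ p := by
    intro i p hp h
    exact ⟨hmu_min i (pvTransfer hlam_pos hper hp h), hlam_min p hp ⟨i, h⟩⟩
  have hdist : ∀ i j, i < j → j < mu + lam → pvOrbit b m i ≠ pvOrbit b m j := by
    intro i j hij hj h
    obtain ⟨h1, h2⟩ := hfactA i (j - i) (by omega)
      (by rw [show i + (j - i) = j by omega]; exact h.symm)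
    omega
  have hbound := pvBound hm hlam_pos hdist
  -- the first stage index at which Brent's phase 1 is guaranteed to meet
  have hKP : ∃ k, mu ≤ 2 ^ k - 1 ∧ lam ≤ 2 ^ k := by
    refine ⟨mu + lam, ?_, ?_⟩ <;>
      · have := Nat.lt_two_pow_self (n := mu + lam)
        omega
  obtain ⟨hK1, hK2⟩ := Nat.find_spec hKP
  have hK_bound : 2 ^ Nat.find hKP ≤ 2 * (mu + lam) + 2 := by
    rcases Nat.eq_zero_or_pos (Nat.find hKP) with h0 | hpos
    · rw [h0]; simp only [pow_zero]; omega
    · have hmin := Nat.find_min hKP (m := Nat.find hKP - 1) (by omega)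
      push_neg at hmin
      have hp : 2 ^ Nat.find hKP = 2 ^ (Nat.find hKP - 1) * 2 := by
        conv_lhs => rw [show Nat.find hKP = Nat.find hKP - 1 + 1 by omega]
        rw [Nat.pow_succ]
      by_cases hc : mu ≤ 2 ^ (Nat.find hKP - 1) - 1
      · have := hmin hc; omega
      · have h1 : 1 ≤ 2 ^ (Nat.find hKP - 1) := Nat.one_le_two_pow
        omega
  set K := Nat.find hKP with hKdef
  -- A's side
  have hA : modular_repeat_cycle b m = ((mu + lam : Nat) : Int) := by
    unfold modular_repeat_cycle
    have h0 := pvALoop_eq hlam_pos hper0 hdist (m.natAbs + 2) 1 (le_refl 1) (by omega)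
      (by omega)
    simpa [pvOrbit, PySem.Set.ofList, PySem.Set.add, List.range_succ] using h0
  -- B's side
  have h1K : 1 ≤ 2 ^ K := Nat.one_le_two_pow
  have hB1 : pvBrentLoop1 b m (4 * (m.natAbs + 2)) b (PySem.Int.mod (b * b) m) 1 1 = lam := by
    have h0 := pvBrent1_eq hlam_pos hper hfactA hK1 hK2 (4 * (m.natAbs + 2)) 0 1
      (le_refl 1) (by norm_num) (Nat.zero_le K) (fun _ => hlam_pos)
      (by intro l' h1' h2'; omega) (by simp; omega)
    have e1 : pvOrbit b m (2 ^ 0 - 1) = b := rfl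
    have e2 : pvOrbit b m (2 ^ 0 - 1 + 1) = PySem.Int.mod (b * b) m := by
      show pvOrbit b m 1 = _
      rw [show (1 : Nat) = 0 + 1 from rfl, pvOrbit_succ]; rfl
    rw [e1, e2] at h0
    simpa using h0
  have hB2 : pvAdvance b m lam b = pvOrbit b m lam := by
    have := pvAdvance_orbit b m lam 0
    simpa [pvOrbit_zero] using this
  have hB3 : pvBrentLoop2 b m (m.natAbs + 2) b (pvOrbit b m lam) 0 = mu := by
    have h0 := pvBrent2_eq hper0 hmu_min (m.natAbs + 2) 0 (Nat.zero_le mu) (by omega)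
    simpa [pvOrbit_zero] using h0
  rw [hA]
  have halt : modular_repeat_cycle_alt b m =
      ((pvBrentLoop2 b m (m.natAbs + 2) b
          (pvAdvance b m
            (pvBrentLoop1 b m (4 * (m.natAbs + 2)) b (PySem.Int.mod (b * b) m) 1 1) b) 0 +
        pvBrentLoop1 b m (4 * (m.natAbs + 2)) b (PySem.Int.mod (b * b) m) 1 1 : Nat) : Int) :=
    rfl
  rw [halt, hB1, hB2, hB3, Nat.add_comm]
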